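-- pv_equiv track=rewrite | github.com/balage-energetix/IrodaAsszisztens | extract_registry.py | is_garbage_row
-- ===== SOURCE A (Python) =====
-- def is_garbage_row(row_items):
--     """Detect rows that are just 'A', 'B', 'C' column markers or numeric indices"""
--     if not row_items or len(row_items) < 3:
--         return False
--
--     # Check for A, B, C... pattern
--     is_abc = True
--     for i, item in enumerate(row_items):
--         txt = item['text'] if isinstance(item, dict) else item
--         txt = str(txt).strip()
--
--         expected_char = chr(65 + i) # A, B, C...
--
--         # Allow empty or matches expected char
--         if txt and txt != expected_char:
--             is_abc = False
--             break
--
--     if is_abc: return True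
--
--     # Check for 1, 2, 3... pattern
--     is_123 = True
--     for i, item in enumerate(row_items):
--         txt = item['text'] if isinstance(item, dict) else item
--         txt = str(txt).strip()
--         if txt and txt != str(i+1):
--             is_123 = False
--             break
--
--     if is_123: return True
--
--     return False
-- ===== SOURCE B (Python) =====
-- def is_garbage_row(row_items):
--     """Detect rows that are just 'A', 'B', 'C' column markers or numeric indices"""
--     if not row_items or len(row_items) < 3:
--         return False
--     is_abc = True
--     is_123 = True
--     for i, item in enumerate(row_items):
--         if not (is_abc or is_123):
--             break
--         txt = str(item['text'] if isinstance(item, dict) else item).strip()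
--         if txt:
--             if txt != chr(65 + i):
--                 is_abc = False
--             if txt != str(i + 1):
--                 is_123 = False
--     return is_abc or is_123
-- ===== Notes on version B (the rewrite author's own statement) =====
-- stated objective: simpler
-- what changed: B replaces A's two sequential break-on-mismatch loops (plus two early returns) by a single pass that extracts each item's text once and maintains both flags (is_abc, is_123) simultaneously, breaking once both are false and returning is_abc or is_123.
import Mathlib
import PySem

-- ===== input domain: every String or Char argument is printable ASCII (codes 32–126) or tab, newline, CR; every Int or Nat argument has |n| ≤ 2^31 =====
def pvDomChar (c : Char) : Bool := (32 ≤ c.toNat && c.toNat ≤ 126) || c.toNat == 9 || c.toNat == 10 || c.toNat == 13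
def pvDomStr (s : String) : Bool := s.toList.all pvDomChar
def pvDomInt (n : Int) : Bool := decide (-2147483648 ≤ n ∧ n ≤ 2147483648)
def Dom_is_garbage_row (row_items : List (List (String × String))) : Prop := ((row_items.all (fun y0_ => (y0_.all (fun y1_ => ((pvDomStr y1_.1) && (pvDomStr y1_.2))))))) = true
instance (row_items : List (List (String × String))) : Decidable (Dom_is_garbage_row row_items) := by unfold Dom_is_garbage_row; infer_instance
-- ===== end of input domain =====

-- ===== PORT A =====
-- A's and B's header line: B fuses A's two marker-scanning loops into one pass with two flags (objective: simpler).
-- 'str(txt)' is identity (values are strings) and isinstance(item, dict) is always true under the type convention.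
def pvTxt (item : List (String × String)) : String :=
  PySem.Str.strip ((PySem.Dict.mk item).getD "text" "")

-- first loop of A: break as soon as a non-empty text differs from 'A','B','C',...
def pvAbcLoop : List (List (String × String)) → Nat → Bool
  | [], _ => true
  | item :: rest, i =>
      let txt := pvTxt item
      if txt ≠ "" ∧ txt ≠ String.ofList [Char.ofNat (65 + i)] then false
      else pvAbcLoop rest (i + 1)

-- second loop of A: break as soon as a non-empty text differs from '1','2','3',...
def pvNumLoop : List (List (String × String)) → Nat → Bool
  | [], _ => true
  | item :: rest, i =>
      let txt := pvTxt item
      if txt ≠ "" ∧ txt ≠ PySem.Int.toStr ((i : Int) + 1) then false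
      else pvNumLoop rest (i + 1)

def is_garbage_row (row_items : List (List (String × String))) : Bool :=
  if row_items.length < 3 then false
  else if pvAbcLoop row_items 0 then true
  else if pvNumLoop row_items 0 then true
  else false

-- ===== PORT B =====
-- B's single pass: two flags updated together, early exit once both are false.
def pvGo : List (List (String × String)) → Nat → Bool → Bool → Bool
  | items, i, a, b =>
      if ¬ (a = true ∨ b = true) then false
      else
        match items with
        | [] => a || b
        | item :: rest =>
            let txt := pvTxt item
            let a' := if txt ≠ "" ∧ txt ≠ String.ofList [Char.ofNat (65 + i)] then false else a
            let b' := if txt ≠ "" ∧ txt ≠ PySem.Int.toStr ((i : Int) + 1) then false else b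
            pvGo rest (i + 1) a' b'

def is_garbage_row_alt (row_items : List (List (String × String))) : Bool :=
  if row_items.length < 3 then false
  else pvGo row_items 0 true true

-- ===== PRECONDITION & SPEC =====
-- helpers for Pre_: does item i carry a 'text' key, and is its stripped text blank-or-the-expected marker
def pvHasText (row_items : List (List (String × String))) (i : Nat) : Bool :=
  ((row_items.getD i []).map Prod.fst).contains "text"
def pvOkAbc (row_items : List (List (String × String))) (j : Nat) : Bool :=
  pvHasText row_items j &&
    (pvTxt (row_items.getD j []) == "" || pvTxt (row_items.getD j []) == String.ofList [Char.ofNat (65 + j)])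
def pvOkNum (row_items : List (List (String × String))) (j : Nat) : Bool :=
  pvHasText row_items j &&
    (pvTxt (row_items.getD j []) == "" || pvTxt (row_items.getD j []) == PySem.Int.toStr ((j : Int) + 1))
-- Pre_ excludes exactly the inputs on which the Python raises KeyError: rows of length ≥ 3 in which
-- some item lacking the 'text' key is preceded only by blank-or-matching items for at least one of
-- the two marker patterns (so one of the scans reaches it); B raises there identically.
def Pre_is_garbage_row (row_items : List (List (String × String))) : Prop :=
  row_items.length < 3 ∨
    ∀ i < row_items.length,
      ((∀ j < i, pvOkAbc row_items j = true) ∨ (∀ j < i, pvOkNum row_items j = true)) →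
        pvHasText row_items i = true
instance (row_items : List (List (String × String))) : Decidable (Pre_is_garbage_row row_items) := by
  unfold Pre_is_garbage_row; infer_instance
def pvWitness_is_garbage_row : (List (List (String × String))) :=
  [[("text", "A")], [("text", "B")], [("text", "C")]]
def Spec_is_garbage_row (row_items : List (List (String × String))) (out : Bool) : Prop := out = is_garbage_row_alt row_items
instance (row_items : List (List (String × String))) (out : Bool) : Decidable (Spec_is_garbage_row row_items out) := by unfold Spec_is_garbage_row; infer_instance

-- ===== CLAIM (what is proved, stated in full; the proofs are below) =====
def Claim_equal_is_garbage_row : Prop := ∀ (row_items : List (List (String × String))), Dom_is_garbage_row row_items → Pre_is_garbage_row row_items → Spec_is_garbage_row row_items (is_garbage_row row_items)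

-- ===== LEMMAS AND PROOFS =====

-- the fused loop computes the conjunction of each flag with its corresponding A-loop
theorem pvGo_eq (items : List (List (String × String))) :
    ∀ (i : Nat) (a b : Bool),
      pvGo items i a b = ((a && pvAbcLoop items i) || (b && pvNumLoop items i)) := by
  induction items with
  | nil =>
      intro i a b
      cases a <;> cases b <;> simp [pvGo, pvAbcLoop, pvNumLoop]
  | cons item rest ih =>
      intro i a b
      cases a <;> cases b <;>
        simp only [pvGo, pvAbcLoop, pvNumLoop, ih] <;>
        split_ifs <;> simp_all

-- ===== VERDICT (by name: the statement is the Claim_ definition above) =====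
theorem is_garbage_row_spec : Claim_equal_is_garbage_row := by
  intro row_items _ _
  unfold Spec_is_garbage_row is_garbage_row is_garbage_row_alt
  by_cases h : row_items.length < 3
  · simp [h]
  · simp only [h, if_false, pvGo_eq, Bool.true_and]
    cases habc : pvAbcLoop row_items 0 <;> cases hnum : pvNumLoop row_items 0 <;> simp
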